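-- pv_equiv track=rewrite | github.com/choiyunh/WALK-A-DAY | Self/KM-1/2.py | solution
-- ===== SOURCE A (Python) =====
-- from collections import defaultdict
--
-- def solution(id_list, k):
--     answer = 0
--     coupon = defaultdict(int)
--     for customers in id_list:
--         for customer in set(customers.split()):
--             if coupon[customer] < k:
--                 coupon[customer] += 1
--                 answer += 1
--     return answer
-- ===== SOURCE B (Python) =====
-- def solution(id_list, k):
--     words = []
--     for customers in id_list:
--         words.extend(set(customers.split()))
--     words.sort()
--     cap = max(k, 0)
--     answer = 0
--     run = 0
--     prev = None
--     for w in words: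
--         if w == prev:
--             run += 1
--         else:
--             answer += min(run, cap)
--             prev, run = w, 1
--     return answer + min(run, cap)
-- ===== Notes on version B (the rewrite author's own statement) =====
-- stated objective: alternative
-- what changed: B eliminates A's hash-map-with-in-loop-cap entirely: it flattens the per-group distinct customers into one list, sorts it, and makes a single run-length scan adding min(run_length, max(k,0)) per run of equal names.
import Mathlib
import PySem

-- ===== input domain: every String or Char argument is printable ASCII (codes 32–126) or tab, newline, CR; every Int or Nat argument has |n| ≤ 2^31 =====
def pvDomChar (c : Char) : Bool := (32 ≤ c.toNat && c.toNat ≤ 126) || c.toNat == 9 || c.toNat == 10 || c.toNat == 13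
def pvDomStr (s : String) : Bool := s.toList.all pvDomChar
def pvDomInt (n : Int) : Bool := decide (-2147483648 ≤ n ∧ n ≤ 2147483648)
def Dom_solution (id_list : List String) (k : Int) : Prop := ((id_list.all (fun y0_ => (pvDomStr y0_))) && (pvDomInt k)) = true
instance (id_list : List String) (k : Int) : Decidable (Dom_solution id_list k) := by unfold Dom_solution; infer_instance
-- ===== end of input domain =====

-- B replaces A's dict-with-in-loop-cap by a different algorithm: flatten the per-group distinct names, sort, and run-length-scan adding min(run, max(k,0)) per run (alternative decomposition, no hash map).


-- ===== PORT A =====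
-- answer/coupon state threaded as a pair; set(customers.split()) is PySem.Set.ofList (the answer does not depend on set iteration order)
def solution (id_list : List String) (k : Int) : Int :=
  (id_list.foldl
    (fun (st : Int × PySem.Dict String Int) customers =>
      (PySem.Set.ofList (PySem.Str.split₀ customers)).foldl
        (fun st customer =>
          if st.2.getD customer 0 < k then (st.1 + 1, st.2.modify customer 0 (· + 1)) else st)
        st)
    (0, PySem.Dict.empty)).1

-- ===== PORT B =====
-- Source B: words.extend(set(...)) per group, words.sort(), then one run-length scan with state (answer, run, prev)
def solution_alt (id_list : List String) (k : Int) : Int :=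
  let words := id_list.foldl
    (fun ws customers => ws ++ PySem.Set.ofList (PySem.Str.split₀ customers)) []
  let sortedWords := PySem.List.sorted words (fun x => x) false
  let cap := max k 0
  let st := sortedWords.foldl
    (fun (st : Int × Int × Option String) w =>
      if some w == st.2.2 then (st.1, st.2.1 + 1, st.2.2)
      else (st.1 + min st.2.1 cap, 1, some w))
    (0, 0, none)
  st.1 + min st.2.1 cap

-- ===== PRECONDITION & SPEC =====
def Spec_solution (id_list : List String) (k : Int) (out : Int) : Prop := out = solution_alt id_list k
instance (id_list : List String) (k : Int) (out : Int) : Decidable (Spec_solution id_list k out) := by unfold Spec_solution; infer_instance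

-- ===== CLAIM (what is proved, stated in full; the proofs are below) =====
def Claim_equal_solution : Prop := ∀ (id_list : List String) (k : Int), Dom_solution id_list k → Spec_solution id_list k (solution id_list k)

-- ===== LEMMAS AND PROOFS =====

-- A's loop body on one customer
def pvStepA (k : Int) (st : Int × PySem.Dict String Int) (c : String) : Int × PySem.Dict String Int :=
  if st.2.getD c 0 < k then (st.1 + 1, st.2.modify c 0 (· + 1)) else st

-- the flattened list of per-group distinct customers
def pvFlat (id_list : List String) : List String :=
  id_list.flatMap (fun customers => PySem.Set.ofList (PySem.Str.split₀ customers))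

-- the capped-count sum over the distinct elements (as a Finset sum)
def pvS (cap : Int) (xs : List String) : Int :=
  ∑ c ∈ xs.toFinset, min (xs.count c : Int) cap

-- B's run-length scan, recursively: current run value p seen r times so far
def pvGo (cap : Int) (p : String) (r : Int) : List String → Int
  | [] => min r cap
  | x :: xs => if x = p then pvGo cap p (r + 1) xs else min r cap + pvGo cap x 1 xs

lemma pvA_eq_flat (id_list : List String) (k : Int) :
    solution id_list k = ((pvFlat id_list).foldl (pvStepA k) (0, PySem.Dict.empty)).1 := by
  unfold solution pvFlat pvStepA
  rw [List.foldl_flatMap]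

-- A's coupon dict after the flattened loop maps each customer to min(count, max k 0)
lemma pvA_getD (k : Int) (L : List String) :
    ∀ c, (L.foldl (pvStepA k) (0, PySem.Dict.empty)).2.getD c 0
      = min (L.count c : Int) (max k 0) := by
  induction L using List.reverseRecOn with
  | nil => intro c; simp [PySem.Dict.getD_empty]
  | append_singleton L x ih =>
    intro c
    rw [List.foldl_append]
    simp only [List.foldl_cons, List.foldl_nil, pvStepA]
    by_cases h : (L.foldl (pvStepA k) (0, PySem.Dict.empty)).2.getD x 0 < k
    · simp only [if_pos h, PySem.Dict.getD_modify]
      rw [ih x] at h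
      by_cases hc : c = x
      · subst hc
        simp [List.count_append, ih c]
        omega
      · simp [if_neg hc, List.count_append, ih c,
          (show ¬(x = c) from fun hh => hc hh.symm)]
    · simp only [if_neg h]
      rw [ih x] at h
      by_cases hc : c = x
      · subst hc
        rw [ih c]
        simp [List.count_append]
        omega
      · rw [ih c, List.count_append]
        simp [(show ¬(x = c) from fun hh => hc hh.symm)]

-- sum over a list where the function changed at exactly one (Nodup) element
lemma pv_sum_map_update {s : List String} (hs : s.Nodup) {x : String} (hx : x ∈ s)
    (f f' : String → Int) (hne : ∀ c ∈ s, c ≠ x → f' c = f c) :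
    (s.map f').sum = (s.map f).sum + (f' x - f x) := by
  obtain ⟨s₁, s₂, rfl⟩ := List.append_of_mem hx
  have h1 : x ∉ s₁ := by
    intro hmem
    exact (List.disjoint_of_nodup_append hs) hmem (by simp)
  have h2 : x ∉ s₂ := by
    have := hs.of_append_right
    simp [List.nodup_cons] at this
    exact this.1
  have e1 : s₁.map f' = s₁.map f := List.map_congr_left (fun c hc =>
    hne c (by simp [hc]) (fun hcx => h1 (hcx ▸ hc)))
  have e2 : s₂.map f' = s₂.map f := List.map_congr_left (fun c hc =>
    hne c (by simp [hc]) (fun hcx => h2 (hcx ▸ hc)))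
  simp [e1, e2]
  ring

-- A's answer after the flattened loop is the capped-count sum
lemma pvA_ans (k : Int) (L : List String) :
    (L.foldl (pvStepA k) (0, PySem.Dict.empty)).1
      = ((PySem.Set.ofList L).map (fun c => min (L.count c : Int) (max k 0))).sum := by
  induction L using List.reverseRecOn with
  | nil => simp [PySem.Set.ofList]
  | append_singleton L x ih =>
    rw [List.foldl_append]
    simp only [List.foldl_cons, List.foldl_nil, pvStepA]
    rw [PySem.Set.ofList_append_singleton, PySem.Set.add_eq_ite]
    by_cases hmem : x ∈ PySem.Set.ofList L
    · have hxL : x ∈ L := (PySem.Set.mem_ofList _ _).1 hmem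
      rw [if_pos hmem]
      have hupd := pv_sum_map_update (PySem.Set.nodup_ofList L) hmem
        (fun c => min (L.count c : Int) (max k 0))
        (fun c => min ((L ++ [x]).count c : Int) (max k 0))
        (fun c _ hcx => by
          simp [List.count_append, (show ¬ (x = c) from fun hh => hcx hh.symm)])
      rw [hupd, ← ih]
      have hget := pvA_getD k L x
      have hcnt : (0 : Int) < (L.count x : Int) := by
        exact_mod_cast Nat.pos_of_ne_zero (fun h0 => (List.count_eq_zero.1 h0) hxL)
      by_cases h : (L.foldl (pvStepA k) (0, PySem.Dict.empty)).2.getD x 0 < k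
      · simp only [if_pos h]
        rw [hget] at h
        simp [List.count_append]
        omega
      · simp only [if_neg h]
        rw [hget] at h
        simp [List.count_append]
        omega
    · have hxL : x ∉ L := fun hh => hmem ((PySem.Set.mem_ofList _ _).2 hh)
      rw [if_neg hmem]
      have hcnt0 : L.count x = 0 := List.count_eq_zero.2 hxL
      have hget := pvA_getD k L x
      rw [hcnt0] at hget
      have hmap : (PySem.Set.ofList L).map (fun c => min ((L ++ [x]).count c : Int) (max k 0))
          = (PySem.Set.ofList L).map (fun c => min (L.count c : Int) (max k 0)) := by
        refine List.map_congr_left (fun c hc => ?_)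
        have hcx : ¬ (x = c) := fun hh => hxL (hh ▸ (PySem.Set.mem_ofList _ _).1 hc)
        simp [List.count_append, hcx]
      by_cases h : (L.foldl (pvStepA k) (0, PySem.Dict.empty)).2.getD x 0 < k
      · simp only [if_pos h]
        rw [hget] at h
        simp only [List.map_append, List.sum_append, hmap, ← ih, List.map_cons,
          List.map_nil, List.sum_cons, List.sum_nil]
        simp [List.count_append, hcnt0]
        omega
      · simp only [if_neg h]
        rw [hget] at h
        simp only [List.map_append, List.sum_append, hmap, ← ih, List.map_cons,
          List.map_nil, List.sum_cons, List.sum_nil]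
        simp [List.count_append, hcnt0]
        omega

-- the A-side map-sum is pvS
lemma pvA_sum_eq_pvS (cap : Int) (L : List String) :
    ((PySem.Set.ofList L).map (fun c => min (L.count c : Int) cap)).sum = pvS cap L := by
  unfold pvS
  have hfin : (PySem.Set.ofList L : List String).toFinset = L.toFinset := by
    apply Finset.ext
    intro a
    simp [List.mem_toFinset, PySem.Set.mem_ofList]
  rw [← hfin, List.sum_toFinset _ (PySem.Set.nodup_ofList L)]

-- pvS depends only on the multiset of elements
lemma pvS_perm (cap : Int) {L M : List String} (h : L.Perm M) : pvS cap L = pvS cap M := by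
  unfold pvS
  rw [List.toFinset_eq_of_perm _ _ h]
  exact Finset.sum_congr rfl (fun c _ => by rw [h.count_eq])

-- peeling the head run out of pvS
lemma pvS_cons (cap : Int) (x : String) (xs : List String) :
    pvS cap (x :: xs)
      = min (((x :: xs).count x : Int)) cap + pvS cap (xs.filter (fun y => y != x)) := by
  unfold pvS
  have hx : x ∈ (x :: xs).toFinset := by simp
  rw [← Finset.add_sum_erase _ _ hx]
  congr 1
  have hfin : ((x :: xs).toFinset).erase x = (xs.filter (fun y => y != x)).toFinset := by
    apply Finset.ext
    intro a
    simp [List.mem_toFinset, Finset.mem_erase, bne_iff_ne, and_comm]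
  rw [hfin]
  refine Finset.sum_congr rfl (fun c hc => ?_)
  have hcx : c ≠ x := by
    simp [List.mem_toFinset, bne_iff_ne] at hc
    exact hc.2
  have h1 : (x :: xs).count c = xs.count c := by
    simp [(show ¬(x = c) from fun hh => hcx hh.symm)]
  have h2 : (xs.filter (fun y => y != x)).count c = xs.count c := by
    rw [List.count_filter]
    simp [bne_iff_ne, hcx]
  rw [h1, h2]

-- the scan over a sorted tail with current run (p, r)
lemma pvGo_spec (cap : Int) (xs : List String) : ∀ (p : String) (r : Int),
    List.Pairwise (· ≤ ·) (p :: xs) →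
    pvGo cap p r xs = min (r + (xs.count p : Int)) cap + pvS cap (xs.filter (fun y => y != p)) := by
  induction xs with
  | nil =>
    intro p r _
    simp [pvGo, pvS]
  | cons x xs ih =>
    intro p r hsort
    have hpx : p ≤ x := (List.pairwise_cons.1 hsort).1 x (by simp)
    have hsx : List.Pairwise (· ≤ ·) (x :: xs) := (List.pairwise_cons.1 hsort).2
    by_cases hxp : x = p
    · subst hxp
      simp only [pvGo]
      rw [ih x (r + 1) hsx]
      have hc : ((x :: xs).count x : Int) = (xs.count x : Int) + 1 := by
        simp
      rw [hc]
      have hfil : (x :: xs).filter (fun y => y != x) = xs.filter (fun y => y != x) := by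
        simp
      rw [hfil]
      have harith : min (r + 1 + (xs.count x : Int)) cap = min (r + ((xs.count x : Int) + 1)) cap := by
        omega
      rw [harith]
      simp
    · simp only [pvGo, if_neg hxp]
      -- p does not occur in x :: xs
      have hnotin : ∀ y ∈ x :: xs, y ≠ p := by
        intro y hy
        rcases List.mem_cons.1 hy with rfl | hy'
        · exact fun hh => hxp hh
        · intro hh
          subst hh
          have hxy : x ≤ y := (List.pairwise_cons.1 hsx).1 y hy'
          exact hxp (le_antisymm hxy hpx)
      have hcnt : (x :: xs).count p = 0 := by
        rw [List.count_eq_zero]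
        intro hmem
        exact hnotin p hmem rfl
      have hfil : (x :: xs).filter (fun y => y != p) = x :: xs := by
        rw [List.filter_eq_self]
        intro y hy
        simpa [bne_iff_ne] using hnotin y hy
      have hS := pvS_cons cap x xs
      rw [ih x 1 hsx, hfil, hcnt]
      have hc : ((x :: xs).count x : Int) = (xs.count x : Int) + 1 := by
        simp
      rw [hc] at hS
      rw [hS]
      push_cast
      omega

-- B's foldl scan equals pvGo once a run has started
lemma pv_foldl_go (cap : Int) (xs : List String) : ∀ (p : String) (r a : Int),
    (let st := xs.foldl
      (fun (st : Int × Int × Option String) w =>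
        if some w == st.2.2 then (st.1, st.2.1 + 1, st.2.2)
        else (st.1 + min st.2.1 cap, 1, some w))
      (a, r, some p)
     st.1 + min st.2.1 cap) = a + pvGo cap p r xs := by
  induction xs with
  | nil => intro p r a; simp [pvGo]
  | cons x xs ih =>
    intro p r a
    simp only [List.foldl_cons]
    by_cases hxp : x = p
    · subst hxp
      simp only [pvGo, beq_self_eq_true, if_true]
      exact ih x (r + 1) a
    · have hbeq : (some x == some p) = false := by
        simp [hxp]
      simp only [pvGo, if_neg hxp, hbeq, Bool.false_eq_true, if_false]
      rw [ih x 1 (a + min r cap)]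
      ring

-- the whole scan over a sorted list is the capped-count sum
lemma pv_scan_eq_pvS (cap : Int) (L : List String) (hcap : 0 ≤ cap)
    (hsort : List.Pairwise (· ≤ ·) L) :
    (let st := L.foldl
      (fun (st : Int × Int × Option String) w =>
        if some w == st.2.2 then (st.1, st.2.1 + 1, st.2.2)
        else (st.1 + min st.2.1 cap, 1, some w))
      (0, 0, none)
     st.1 + min st.2.1 cap) = pvS cap L := by
  cases L with
  | nil => simp [pvS]; omega
  | cons x xs =>
    simp only [List.foldl_cons]
    have hstep : (some x == (none : Option String)) = false := rfl
    simp only [hstep, Bool.false_eq_true, if_false]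
    have h0 : min (0 : Int) cap = 0 := by omega
    rw [h0]
    have hgo := pv_foldl_go cap xs x 1 0
    simp only [zero_add] at hgo
    simp only [add_zero]
    rw [hgo, pvGo_spec cap xs x 1 hsort, pvS_cons cap x xs]
    have hc : ((x :: xs).count x : Int) = (xs.count x : Int) + 1 := by
      simp
    rw [hc]
    omega

-- ===== VERDICT (by name: the statement is the Claim_ definition above) =====
theorem solution_spec : Claim_equal_solution := by
  intro id_list k _
  show solution id_list k = solution_alt id_list k
  rw [pvA_eq_flat, pvA_ans, pvA_sum_eq_pvS]
  unfold solution_alt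
  rw [PySem.List.foldl_append_eq_flatMap]
  simp only [List.nil_append]
  set F := pvFlat id_list with hF
  have hwords : id_list.flatMap (fun customers => PySem.Set.ofList (PySem.Str.split₀ customers)) = F := rfl
  rw [hwords]
  have hsort : List.Pairwise (· ≤ ·) (PySem.List.sorted F (fun x => x) false) :=
    PySem.List.sorted_pairwise F (fun x => x)
  have hperm : (PySem.List.sorted F (fun x => x) false).Perm F :=
    PySem.List.sorted_perm F (fun x => x) false
  rw [pv_scan_eq_pvS (max k 0) _ (by omega) hsort, pvS_perm (max k 0) hperm]
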